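-- pv_equiv track=rewrite | github.com/jikhanjung/RefServer | test_v019_features.py | _check_priority_order
-- ===== SOURCE A (Python) =====
-- from typing import Dict, List, Any, Optional
--
-- def _check_priority_order(queue_items: List[Dict]) -> bool:
--     """Check if queue items are in correct priority order"""
--     try:
--         priority_values = {'URGENT': 0, 'HIGH': 1, 'NORMAL': 2, 'LOW': 3}
--
--         for i in range(len(queue_items) - 1):
--             current_priority = priority_values.get(queue_items[i].get('priority', 'NORMAL'), 2)
--             next_priority = priority_values.get(queue_items[i + 1].get('priority', 'NORMAL'), 2)
--
--             if current_priority > next_priority:  # Lower number = higher priority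
--                 return False
--
--         return True
--
--     except:
--         return False
-- ===== SOURCE B (Python) =====
-- def _check_priority_order(queue_items):
--     """Check if queue items are in correct priority order"""
--     try:
--         priority_values = {'URGENT': 0, 'HIGH': 1, 'NORMAL': 2, 'LOW': 3}
--         priorities = [priority_values.get(item.get('priority', 'NORMAL'), 2)
--                       for item in queue_items]
--         return priorities == sorted(priorities)
--     except:
--         return False
-- ===== Notes on version B (the rewrite author's own statement) =====
-- stated objective: idiomatic
-- what changed: Replaces the indexed adjacent-pair scan with early return by building the priority list once and comparing it to its sorted copy (priorities == sorted(priorities)).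
import Mathlib
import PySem

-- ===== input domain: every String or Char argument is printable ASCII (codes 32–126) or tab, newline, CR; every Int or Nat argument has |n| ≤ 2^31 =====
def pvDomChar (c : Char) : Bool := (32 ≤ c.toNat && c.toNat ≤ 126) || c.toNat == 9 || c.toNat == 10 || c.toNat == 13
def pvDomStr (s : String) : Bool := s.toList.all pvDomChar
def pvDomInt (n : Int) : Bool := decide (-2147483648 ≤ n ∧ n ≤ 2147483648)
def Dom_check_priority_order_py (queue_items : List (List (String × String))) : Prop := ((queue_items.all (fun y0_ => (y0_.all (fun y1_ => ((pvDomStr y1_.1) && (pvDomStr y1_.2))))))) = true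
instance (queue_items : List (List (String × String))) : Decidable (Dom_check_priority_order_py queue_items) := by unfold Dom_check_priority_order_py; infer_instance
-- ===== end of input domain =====

-- B replaces A's indexed adjacent-pair scan by 'priorities == sorted(priorities)' (idiomatic; same result).
-- The try/except in both Pythons never fires on the typed domain (dict .get is total), so both ports are total.

-- ===== PORT A =====
-- priority_values = {'URGENT': 0, 'HIGH': 1, 'NORMAL': 2, 'LOW': 3}
def priorityValues : PySem.Dict String Int :=
  PySem.Dict.ofList [("URGENT", 0), ("HIGH", 1), ("NORMAL", 2), ("LOW", 3)]

-- priority_values.get(item.get('priority', 'NORMAL'), 2)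
def priorityOf (item : List (String × String)) : Int :=
  PySem.Dict.getD priorityValues (PySem.Dict.getD (PySem.Dict.mk item) "priority" "NORMAL") 2

-- the 'for i in range(len(queue_items) - 1)' loop with its early 'return False';
-- fuel counts the remaining iterations, i is the loop index; queue_items[i] is Python indexing (pyGetD, always in range here)
def aLoop (queue_items : List (List (String × String))) (i : Nat) : Nat → Bool
  | 0 => true
  | fuel + 1 =>
    if priorityOf (PySem.List.pyGetD queue_items (i : Int) []) >
        priorityOf (PySem.List.pyGetD queue_items ((i : Int) + 1) []) then false
    else aLoop queue_items (i + 1) fuel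

def check_priority_order_py (queue_items : List (List (String × String))) : Bool :=
  aLoop queue_items 0 (queue_items.length - 1)

-- ===== PORT B =====
def check_priority_order_py_alt (queue_items : List (List (String × String))) : Bool :=
  let priorities := queue_items.map priorityOf
  priorities == PySem.List.sorted priorities (fun x => x) false

-- ===== PRECONDITION & SPEC =====
def Spec_check_priority_order_py (queue_items : List (List (String × String))) (out : Bool) : Prop := out = check_priority_order_py_alt queue_items
instance (queue_items : List (List (String × String))) (out : Bool) : Decidable (Spec_check_priority_order_py queue_items out) := by unfold Spec_check_priority_order_py; infer_instance

-- ===== CLAIM (what is proved, stated in full; the proofs are below) =====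
def Claim_equal_check_priority_order_py : Prop := ∀ (queue_items : List (List (String × String))), Dom_check_priority_order_py queue_items → Spec_check_priority_order_py queue_items (check_priority_order_py queue_items)

-- ===== LEMMAS AND PROOFS =====
-- A's loop succeeds iff every adjacent pair in its remaining window is in order
lemma aLoop_eq_true_iff (queue_items : List (List (String × String))) (fuel i : Nat) :
    aLoop queue_items i fuel = true ↔
      ∀ j, i ≤ j → j < i + fuel →
        priorityOf (PySem.List.pyGetD queue_items (j : Int) []) ≤
          priorityOf (PySem.List.pyGetD queue_items ((j : Int) + 1) []) := by
  induction fuel generalizing i with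
  | zero =>
    simp only [aLoop]
    constructor
    · intro _ j hij hj; omega
    · intro _; trivial
  | succ fuel ih =>
    simp only [aLoop]
    split
    · rename_i hgt
      constructor
      · intro hfalse; exact absurd hfalse (by simp)
      · intro hall
        exact absurd (hall i le_rfl (by omega)) (not_le.mpr hgt)
    · rename_i hgt
      rw [ih]
      constructor
      · intro hall j hij hj
        rcases Nat.eq_or_lt_of_le hij with rfl | hlt
        · omega
        · exact hall j hlt (by omega)
      · intro hall j hij hj
        exact hall j (by omega) (by omega)

-- Python indexing inside the loop window is plain getElem
lemma pyGetD_window (queue_items : List (List (String × String))) (j : Nat)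
    (hj : j < queue_items.length) :
    PySem.List.pyGetD queue_items (j : Int) [] = queue_items[j] := by
  rw [PySem.List.pyGetD_natCast]
  exact List.getD_eq_getElem _ _ hj

-- adjacent order of an Int list is the same as pairwise order (transitivity)
lemma pairwise_iff_adjacent (ps : List Int) :
    ps.Pairwise (· ≤ ·) ↔ ∀ j, ∀ (hj : j + 1 < ps.length), ps[j] ≤ ps[j + 1] := by
  rw [List.pairwise_iff_getElem]
  constructor
  · intro h j hj
    exact h j (j + 1) (by omega) hj (by omega)
  · intro h a b ha hb hab
    induction b with
    | zero => omega
    | succ b ih =>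
      have hb' : b < ps.length := by omega
      have hstep : ps[b] ≤ ps[b + 1] := h b hb
      rcases Nat.lt_or_ge a b with hlt | hge
      · exact le_trans (ih hb' hlt) hstep
      · have : a = b := by omega
        subst this; exact hstep

lemma adjacent_iff_pairwise (queue_items : List (List (String × String))) :
    (∀ j, 0 ≤ j → j < 0 + (queue_items.length - 1) →
        priorityOf (PySem.List.pyGetD queue_items (j : Int) []) ≤
          priorityOf (PySem.List.pyGetD queue_items ((j : Int) + 1) [])) ↔
      (queue_items.map priorityOf).Pairwise (· ≤ ·) := by
  rw [pairwise_iff_adjacent]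
  have hcast : ∀ j : Nat, ((j : Int) + 1) = ((j + 1 : Nat) : Int) := by intro j; push_cast; ring
  constructor
  · intro hall j hj
    simp only [List.length_map] at hj
    have := hall j (Nat.zero_le j) (by omega)
    rw [pyGetD_window _ _ (by omega), hcast j, pyGetD_window _ _ (by omega)] at this
    simpa using this
  · intro hch j _ hj
    rw [pyGetD_window _ _ (by omega), hcast j, pyGetD_window _ _ (by omega)]
    have := hch j (by simp only [List.length_map]; omega)
    simpa using this

lemma sorted_eq_self_iff (ps : List Int) :
    PySem.List.sorted ps (fun x => x) false = ps ↔ ps.Pairwise (· ≤ ·) := by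
  constructor
  · intro heq
    have := PySem.List.sorted_pairwise ps (fun x => x)
    rw [heq] at this
    simpa using this
  · intro hp
    exact PySem.List.sorted_eq_self_of_pairwise ps (fun x => x) (by simpa using hp)

-- ===== VERDICT (by name: the statement is the Claim_ definition above) =====
theorem check_priority_order_py_spec : Claim_equal_check_priority_order_py := by
  intro queue_items _
  unfold Spec_check_priority_order_py check_priority_order_py check_priority_order_py_alt
  rw [Bool.eq_iff_iff, aLoop_eq_true_iff]
  simp only [beq_iff_eq]
  rw [adjacent_iff_pairwise, eq_comm, sorted_eq_self_iff]
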